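-- pv_equiv track=rewrite | github.com/dlabaja/python-skola | pokrocile/sorting_algorithms.py | remove_even_zeroes
-- ===== SOURCE A (Python) =====
-- def remove_even_zeroes(ls):
--     index = 0
--     zero_count = 0
--     while index <= len(ls) - 1:
--         if ls[index] == 0:
--             zero_count += 1
--             if zero_count % 2 == 0 and zero_count != 0:
--                 ls.pop(index)
--                 index -= 1
--         index += 1
--     return ls
-- ===== SOURCE B (Python) =====
-- def remove_even_zeroes(ls):
--     zeros = [i for i, x in enumerate(ls) if x == 0]
--     for i in reversed(zeros[1::2]):
--         del ls[i]
--     return ls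
-- ===== Notes on version B (the rewrite author's own statement) =====
-- stated objective: simpler
-- what changed: A's single interleaved while-loop that counts zeros and pops in place (re-adjusting the index after each pop) is replaced by a two-pass decomposition: one comprehension collects the indices of all zeros, then every second such index (zeros[1::2]) is deleted back to front so earlier indices stay valid.
import Mathlib
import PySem

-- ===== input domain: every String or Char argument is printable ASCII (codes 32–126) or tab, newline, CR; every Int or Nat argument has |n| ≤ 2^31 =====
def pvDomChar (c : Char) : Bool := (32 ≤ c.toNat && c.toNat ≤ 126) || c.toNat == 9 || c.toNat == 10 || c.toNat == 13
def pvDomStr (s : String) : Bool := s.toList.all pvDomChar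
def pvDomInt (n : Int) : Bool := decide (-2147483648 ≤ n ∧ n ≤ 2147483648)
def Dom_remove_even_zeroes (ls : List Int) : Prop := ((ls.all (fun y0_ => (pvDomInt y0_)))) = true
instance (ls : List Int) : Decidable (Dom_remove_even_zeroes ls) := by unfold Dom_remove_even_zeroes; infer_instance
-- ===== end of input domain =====

-- B replaces A's interleaved count-and-pop while loop by a two-pass structure (collect the zero
-- indices, then delete every second one back to front); simpler, same asymptotic cost.
-- In Python both A and B mutate the argument list in place and return the same object; the
-- equivalence proved here is about the RETURN value (the net mutation is the same list value).

-- ===== PORT A =====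
-- A's while loop: state (ls, index, zero_count); each iteration either pops (list shrinks,
-- index unchanged) or advances index, so (len ls - index) decreases.
def removeEvenZeroesLoop (ls : List Int) (index : Int) (zero_count : Int) : List Int :=
  if _h : index ≤ (ls.length : Int) - 1 then
    match PySem.List.pyGet? ls index with
    | none => ls  -- unreachable: every call A makes keeps 0 ≤ index < len ls
    | some v =>
      if v = 0 then
        if PySem.Int.mod (zero_count + 1) 2 = 0 ∧ zero_count + 1 ≠ 0 then
          match hp : PySem.List.pop? ls index with
          | none => ls  -- unreachable: pyGet? succeeded at the same index
          | some r => removeEvenZeroesLoop r.2 (index - 1 + 1) (zero_count + 1)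
        else removeEvenZeroesLoop ls (index + 1) (zero_count + 1)
      else removeEvenZeroesLoop ls (index + 1) zero_count
  else ls
termination_by ((ls.length : Int) - index).toNat
decreasing_by
  · have := PySem.List.length_of_pop?_eq_some ls hp; omega
  · omega
  · omega

def remove_even_zeroes (ls : List Int) : List Int := removeEvenZeroesLoop ls 0 0

-- ===== PORT B =====
def remove_even_zeroes_alt (ls : List Int) : List Int :=
  let zeros := ((PySem.List.enumerate ls 0).filter (fun p => p.2 == 0)).map (fun p => p.1)
  let to_delete := (PySem.List.slice? zeros (some 1) none 2).getD []  -- step is the literal 2 ≠ 0, so slice? is never none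
  to_delete.reverse.foldl (fun acc i => ((PySem.List.pop? acc i).map (fun r => r.2)).getD acc) ls

-- ===== PRECONDITION & SPEC =====
def Spec_remove_even_zeroes (ls : List Int) (out : List Int) : Prop := out = remove_even_zeroes_alt ls
instance (ls : List Int) (out : List Int) : Decidable (Spec_remove_even_zeroes ls out) := by unfold Spec_remove_even_zeroes; infer_instance

-- ===== CLAIM (what is proved, stated in full; the proofs are below) =====
def Claim_equal_remove_even_zeroes : Prop := ∀ (ls : List Int), Dom_remove_even_zeroes ls → Spec_remove_even_zeroes ls (remove_even_zeroes ls)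

-- ===== LEMMAS AND PROOFS =====

-- Reference spec both programs are reduced to: keep/drop zeros alternately;
-- flag b = "drop the next zero".
def goSpec : List Int → Bool → List Int
  | [], _ => []
  | x :: xs, b =>
    if x = 0 then (if b then goSpec xs false else x :: goSpec xs true)
    else x :: goSpec xs b

-- selB true l = l[0::2], selB false l = l[1::2]
def selB : Bool → List Int → List Int
  | _, [] => []
  | true, x :: t => x :: selB false t
  | false, _ :: t => selB true t

-- the "del ls[i]" step of B's fold
def pvDel (acc : List Int) (i : Int) : List Int :=
  ((PySem.List.pop? acc i).map (fun r => r.2)).getD acc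

-- B's first pass
def pvZeros (ls : List Int) : List Int :=
  ((PySem.List.enumerate ls 0).filter (fun p => p.2 == 0)).map (fun p => p.1)

theorem selB_map (b : Bool) (l : List Int) (f : Int → Int) :
    selB b (l.map f) = (selB b l).map f := by
  induction l generalizing b with
  | nil => cases b <;> rfl
  | cons x t ih => cases b <;> simp [selB, ih]

theorem mem_selB {b : Bool} {l : List Int} {i : Int} (h : i ∈ selB b l) : i ∈ l := by
  induction l generalizing b with
  | nil => cases b <;> simp [selB] at h
  | cons x t ih =>
    cases b with
    | true => simp [selB] at h; rcases h with rfl | h; · simp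
              · exact List.mem_cons_of_mem _ (ih h)
    | false => exact List.mem_cons_of_mem _ (ih h)

theorem filterMap_odd (l : List Int) :
    (List.range (l.length / 2)).filterMap (fun k => l[2*k+1]?) = selB false l :=
  match l with
  | [] => rfl
  | [_] => by simp [selB]
  | x :: y :: t => by
    have ih := filterMap_odd t
    rw [show (x::y::t).length / 2 = t.length/2 + 1 by simp; omega, List.range_succ_eq_map]
    rw [List.filterMap_cons]
    simp only [show (x :: y :: t)[2*0+1]? = some y from rfl, List.filterMap_map]
    have hf : ((fun k => (x::y::t)[2*k+1]?) ∘ Nat.succ) = (fun k => t[2*k+1]?) := by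
      funext k
      simp [Function.comp, show 2*(k+1)+1 = 2*k+1+1+1 from by ring, List.getElem?_cons_succ]
    rw [hf, ih]
    simp [selB]

theorem slice_odd (l : List Int) :
    PySem.List.slice? l (some 1) none 2 = some (selB false l) := by
  cases l with
  | nil => rfl
  | cons x t =>
    simp only [PySem.List.slice?, PySem.List.sliceIndices]
    norm_num
    by_cases ht : 0 < t.length
    · rw [if_pos ht]
      rw [show (((t.length : Int) + 2 - 1) / 2).toNat = (x :: t).length / 2 by simp; omega]
      rw [show (fun k : Nat => (x :: t)[(1 + 2 * (k:Int)).toNat]?) = (fun k => (x::t)[2*k+1]?) by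
        funext k; congr 1; omega]
      rw [filterMap_odd]
    · rw [if_neg ht]
      obtain rfl : t = [] := List.eq_nil_of_length_eq_zero (by omega)
      simp [selB]

theorem enumerate_shift (xs : List Int) (s : Int) :
    PySem.List.enumerate xs (s + 1) = (PySem.List.enumerate xs s).map (fun p => (p.1 + 1, p.2)) := by
  induction xs generalizing s with
  | nil => rfl
  | cons x t ih => simp [PySem.List.enumerate_cons, ih]

theorem pvZeros_cons (x : Int) (xs : List Int) :
    pvZeros (x :: xs) = (if x = 0 then [0] else []) ++ (pvZeros xs).map (· + 1) := by
  unfold pvZeros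
  rw [PySem.List.enumerate_cons, show (0 : Int) + 1 = 0 + 1 by ring, enumerate_shift]
  by_cases hx : x = 0 <;>
    simp [hx, List.filter_map, List.map_map, Function.comp_def]

theorem pvZeros_nonneg {ls : List Int} {i : Int} (h : i ∈ pvZeros ls) : 0 ≤ i := by
  unfold pvZeros at h
  simp only [List.mem_map, List.mem_filter] at h
  obtain ⟨p, ⟨hp, _⟩, rfl⟩ := h
  rw [PySem.List.mem_enumerate_iff] at hp
  obtain ⟨k, hk, rfl⟩ := hp
  simp

theorem del_cons (i : Int) (hi : 0 ≤ i) (x : Int) (xs : List Int) :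
    pvDel (x :: xs) (i + 1) = x :: pvDel xs i := by
  unfold pvDel
  obtain ⟨n, rfl⟩ := Int.eq_ofNat_of_zero_le hi
  by_cases h : n < xs.length
  · rw [show ((n:Int) + 1) = ((n+1 : Nat) : Int) by push_cast; ring,
      PySem.List.pop?_natCast _ _ (by simpa using h), PySem.List.pop?_natCast _ _ h]
    simp
  · have h1 : PySem.List.pop? xs (n:Int) = none := by
      simp only [PySem.List.pop?, PySem.List.pyIdx?]
      rw [if_pos (by positivity), if_neg (by omega)]
      rfl
    have h2 : PySem.List.pop? (x :: xs) ((n:Int)+1) = none := by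
      simp only [PySem.List.pop?, PySem.List.pyIdx?]
      rw [if_pos (by positivity), if_neg (by simp; omega)]
      rfl
    simp [h1, h2]

theorem del_zero (x : Int) (xs : List Int) : pvDel (x :: xs) 0 = xs := by
  simp [pvDel, PySem.List.pop?_zero_cons]

theorem delFold_map (ds : List Int) (hds : ∀ i ∈ ds, 0 ≤ i) (x : Int) (xs : List Int) :
    (ds.map (· + 1)).foldl pvDel (x :: xs) = x :: ds.foldl pvDel xs := by
  induction ds generalizing xs with
  | nil => rfl
  | cons i t ih =>
    simp only [List.map_cons, List.foldl_cons]
    rw [del_cons i (hds i (by simp)) x xs]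
    exact ih (fun j hj => hds j (by simp [hj])) _

theorem main_B (xs : List Int) :
    ((selB false (pvZeros xs)).reverse.foldl pvDel xs = goSpec xs false) ∧
    ((selB true (pvZeros xs)).reverse.foldl pvDel xs = goSpec xs true) := by
  induction xs with
  | nil => constructor <;> rfl
  | cons x t ih =>
    have hz : ∀ (b : Bool), ∀ i ∈ (selB b (pvZeros t)).reverse, 0 ≤ i := by
      intro b i hi
      exact pvZeros_nonneg (mem_selB (List.mem_reverse.mp hi))
    by_cases hx : x = 0
    · subst hx
      rw [pvZeros_cons, if_pos rfl]
      constructor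
      · rw [List.singleton_append,
          show selB false (0 :: (pvZeros t).map (· + 1)) = selB true ((pvZeros t).map (· + 1)) from rfl,
          selB_map, ← List.map_reverse, delFold_map _ (hz true)]
        simp [goSpec, ih.2]
      · rw [List.singleton_append,
          show selB true (0 :: (pvZeros t).map (· + 1)) = 0 :: selB false ((pvZeros t).map (· + 1)) from rfl,
          selB_map, List.reverse_cons, ← List.map_reverse, List.foldl_append,
          delFold_map _ (hz false)]
        simp [del_zero, goSpec, ih.1]
    · rw [pvZeros_cons, if_neg hx, List.nil_append]
      constructor <;>
      · rw [selB_map, ← List.map_reverse, delFold_map _ (hz _)]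
        simp [goSpec, hx, ih.1, ih.2]

theorem eraseIdx_app (l1 l2 : List Int) (y : Int) : (l1 ++ y :: l2).eraseIdx l1.length = l1 ++ l2 := by
  induction l1 with
  | nil => rfl
  | cons a t ih => simpa [List.eraseIdx] using ih

theorem pop_app (pre ys : List Int) (y : Int) :
    PySem.List.pop? (pre ++ y :: ys) (pre.length : Int) = some (y, pre ++ ys) := by
  rw [PySem.List.pop?_natCast _ _ (by simp)]
  congr 1
  refine Prod.ext ?_ ?_
  · exact List.getElem_of_append rfl rfl
  · exact eraseIdx_app pre ys y

theorem loopA_eq (suf : List Int) (pre : List Int) (zc : Int) (hzc : 0 ≤ zc) :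
    removeEvenZeroesLoop (pre ++ suf) (pre.length : Int) zc
      = pre ++ goSpec suf (decide (zc % 2 = 1)) := by
  induction suf generalizing pre zc with
  | nil =>
    rw [removeEvenZeroesLoop]
    simp [goSpec]
  | cons y ys ih =>
    rw [removeEvenZeroesLoop,
      dif_pos (by simp only [List.length_append, List.length_cons]; push_cast; omega),
      PySem.List.pyGet?_append_length]
    split
    next h => simp at h
    next v hv =>
      obtain rfl : y = v := by injection hv
      by_cases hy : y = 0
      · subst hy
        rw [if_pos rfl, PySem.Int.mod_eq_emod_of_pos (by norm_num)]
        by_cases hodd : zc % 2 = 1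
        · rw [if_pos ⟨by omega, by omega⟩]
          split
          next h => rw [pop_app] at h; simp at h
          next r hr =>
            rw [pop_app] at hr
            obtain rfl : (0, pre ++ ys) = r := by injection hr
            rw [show (pre.length : Int) - 1 + 1 = (pre.length : Int) by ring]
            rw [ih pre (zc + 1) (by omega)]
            simp [goSpec, hodd, show ¬ (zc + 1) % 2 = 1 by omega]
        · rw [if_neg (by omega)]
          rw [show (pre.length : Int) + 1 = ((pre ++ [(0:Int)]).length : Int) by simp,
            show pre ++ (0:Int) :: ys = (pre ++ [0]) ++ ys by simp,
            ih (pre ++ [0]) (zc + 1) (by omega)]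
          simp [goSpec, hodd, show (zc + 1) % 2 = 1 by omega]
      · rw [if_neg hy]
        rw [show (pre.length : Int) + 1 = ((pre ++ [y]).length : Int) by simp,
          show pre ++ y :: ys = (pre ++ [y]) ++ ys by simp,
          ih (pre ++ [y]) zc hzc]
        simp [goSpec, hy]

-- ===== VERDICT (by name: the statement is the Claim_ definition above) =====
theorem remove_even_zeroes_spec : Claim_equal_remove_even_zeroes := by
  intro ls _
  unfold Spec_remove_even_zeroes remove_even_zeroes remove_even_zeroes_alt
  have hA := loopA_eq ls [] 0 (by norm_num)
  simp only [List.nil_append, List.length_nil, Int.natCast_zero] at hA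
  rw [hA]
  show goSpec ls (decide ((0:Int) % 2 = 1))
      = ((PySem.List.slice? (pvZeros ls) (some 1) none 2).getD []).reverse.foldl pvDel ls
  rw [slice_odd, Option.getD_some]
  simpa using (main_B ls).1.symm
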